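-- pv_equiv track=rewrite | github.com/ltsRoy/codeforces | problemsetqs/2003A.py | split_by_same_char
-- ===== SOURCE A (Python) =====
-- def split_by_same_char(s):
--     result = []
--     i = 0
--     while i < len(s):
--         start_char = s[i]
--         j = i + 1
--         while j < len(s) and s[j] != start_char:
--             j += 1
--         result.append(s[i:j+1])
--         i = j + 1
--     return result
-- ===== SOURCE B (Python) =====
-- def split_by_same_char(s):
--     result = []
--     start = None
--     buf = []
--     for ch in s:
--         if start is None:
--             start = ch
--             buf = [ch]
--         else:
--             buf.append(ch)
--             if ch == start:
--                 result.append(''.join(buf))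
--                 start = None
--     if start is not None:
--         result.append(''.join(buf))
--     return result
-- ===== Notes on version B (the rewrite author's own statement) =====
-- stated objective: alternative
-- what changed: Replaced A's outer-index loop with an inner index scan for the recurring start char (plus slicing) by a single forward-pass state machine that keeps an open-segment start char and a buffer, emitting a segment when the start char recurs and flushing the remaining buffer at the end.
import Mathlib
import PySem

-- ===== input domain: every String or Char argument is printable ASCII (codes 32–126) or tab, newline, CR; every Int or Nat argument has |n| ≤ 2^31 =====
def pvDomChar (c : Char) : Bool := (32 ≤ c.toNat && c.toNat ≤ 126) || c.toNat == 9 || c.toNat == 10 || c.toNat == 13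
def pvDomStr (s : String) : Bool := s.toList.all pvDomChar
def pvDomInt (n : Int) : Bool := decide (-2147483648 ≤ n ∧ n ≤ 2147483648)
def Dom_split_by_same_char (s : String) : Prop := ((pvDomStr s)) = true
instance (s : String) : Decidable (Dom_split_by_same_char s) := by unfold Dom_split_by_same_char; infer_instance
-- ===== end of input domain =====

-- B replaces A's nested index loops (outer cursor + inner scan for the start char) by a
-- single forward pass with an open-segment state machine; objective: alternative/simpler traversal.

-- ===== PORT A =====
-- inner while: 'while j < len(s) and s[j] != start_char: j += 1'
def pvAFind (cs : List Char) (c : Char) (j : Nat) : Nat :=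
  if h : j < cs.length then
    if cs[j] ≠ c then pvAFind cs c (j + 1) else j
  else j
termination_by cs.length - j

theorem pvAFind_ge (cs : List Char) (c : Char) (j : Nat) : j ≤ pvAFind cs c j := by
  unfold pvAFind
  split
  · split
    · exact le_trans (Nat.le_succ j) (pvAFind_ge cs c (j + 1))
    · exact le_refl j
  · exact le_refl j
termination_by cs.length - j

-- outer while over i; 'result.append(s[i:j+1]); i = j + 1' collected by the recursion
def pvALoop (cs : List Char) (i : Nat) : List String :=
  if h : i < cs.length then
    let c := cs[i]
    let j := pvAFind cs c (i + 1)
    String.ofList (PySem.List.slice cs (some (i : Int)) (some ((j : Int) + 1))) :: pvALoop cs (j + 1)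
  else []
termination_by cs.length - i
decreasing_by
  have := pvAFind_ge cs cs[i] (i + 1)
  omega

def split_by_same_char (s : String) : List String := pvALoop s.toList 0

-- ===== PORT B =====
-- state: (result so far, open-segment start char (none = no segment open), buffer)
def pvBStep (st : List String × Option Char × List Char) (ch : Char) :
    List String × Option Char × List Char :=
  match st with
  | (res, none, _) => (res, some ch, [ch])
  | (res, some c, buf) =>
    let buf' := buf ++ [ch]
    if ch = c then (res ++ [String.ofList buf'], none, buf') else (res, some c, buf')

def split_by_same_char_alt (s : String) : List String :=
  match s.toList.foldl pvBStep ([], none, []) with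
  | (res, none, _) => res
  | (res, some _, buf) => res ++ [String.ofList buf]

-- ===== PRECONDITION & SPEC =====
def Spec_split_by_same_char (s : String) (out : List String) : Prop := out = split_by_same_char_alt s
instance (s : String) (out : List String) : Decidable (Spec_split_by_same_char s out) := by unfold Spec_split_by_same_char; infer_instance

-- ===== CLAIM (what is proved, stated in full; the proofs are below) =====
def Claim_equal_split_by_same_char : Prop := ∀ (s : String), Dom_split_by_same_char s → Spec_split_by_same_char s (split_by_same_char s)

-- ===== LEMMAS AND PROOFS =====

-- 'break' at the first occurrence of c: (prefix without c, rest starting at the first c)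
def pvBrk (c : Char) : List Char → List Char × List Char
  | [] => ([], [])
  | x :: t => if x = c then ([], x :: t) else
      let (p, r) := pvBrk c t
      (x :: p, r)

theorem pvBrk_append (c : Char) (t : List Char) :
    (pvBrk c t).1 ++ (pvBrk c t).2 = t := by
  induction t with
  | nil => rfl
  | cons x t ih =>
    by_cases h : x = c <;> simp [pvBrk, h, ih]

theorem pvBrk_len (c : Char) (t : List Char) : (pvBrk c t).2.length ≤ t.length := by
  have := congrArg List.length (pvBrk_append c t)
  simp at this; omega

-- structural (list-level) form of A's segmentation
def pvAList : List Char → List String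
  | [] => []
  | c :: t =>
    let pr := pvBrk c t
    String.ofList (c :: (pr.1 ++ pr.2.take 1)) :: pvAList pr.2.tail
termination_by l => l.length
decreasing_by
  show (pvBrk c t).2.tail.length < (c :: t).length
  have h1 := pvBrk_len c t
  have h2 : (pvBrk c t).2.tail.length = (pvBrk c t).2.length - 1 := List.length_tail
  simp only [List.length_cons]
  omega

theorem pvAFind_eq_brk (cs : List Char) (c : Char) (j : Nat) :
    pvAFind cs c j = j + (pvBrk c (cs.drop j)).1.length := by
  unfold pvAFind
  split
  · rename_i h
    have hd : cs.drop j = cs[j] :: cs.drop (j + 1) := List.drop_eq_getElem_cons h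
    split
    · rename_i hne
      rw [pvAFind_eq_brk cs c (j + 1), hd]
      simp [pvBrk, hne]
      omega
    · rename_i heq
      simp at heq
      rw [hd]
      simp [pvBrk, heq]
  · rename_i h
    rw [List.drop_eq_nil_of_le (by omega)]
    simp [pvBrk]
termination_by cs.length - j

theorem pvALoop_eq_aList (cs : List Char) (i : Nat) :
    pvALoop cs i = pvAList (cs.drop i) := by
  rw [pvALoop]
  split
  · rename_i h
    show String.ofList (PySem.List.slice cs (some (i : Int))
          (some ((↑(pvAFind cs cs[i] (i + 1)) : Int) + 1)))
        :: pvALoop cs (pvAFind cs cs[i] (i + 1) + 1) = pvAList (cs.drop i)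
    have hd : cs.drop i = cs[i] :: cs.drop (i + 1) := List.drop_eq_getElem_cons h
    set pr := pvBrk cs[i] (cs.drop (i + 1)) with hpr
    have hj : pvAFind cs cs[i] (i + 1) = i + 1 + pr.1.length :=
      pvAFind_eq_brk cs cs[i] (i + 1)
    have happ : pr.1 ++ pr.2 = cs.drop (i + 1) := pvBrk_append _ _
    rw [hj]
    have hdropj : cs.drop (i + 1 + pr.1.length) = pr.2 := by
      rw [← List.drop_drop, ← happ, List.drop_left]
    have hslice : PySem.List.slice cs (some (i : Int))
        (some ((↑(i + 1 + pr.1.length) : Int) + 1)) = cs[i] :: (pr.1 ++ pr.2.take 1) := by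
      have hcast : ((↑(i + 1 + pr.1.length) : Int) + 1)
          = ((i + 1 + pr.1.length + 1 : Nat) : Int) := by push_cast; ring
      rw [hcast, PySem.List.slice_natCast]
      have h1 : cs.drop i = cs[i] :: (pr.1 ++ pr.2) := by rw [hd, happ]
      rw [h1, show i + 1 + pr.1.length + 1 - i = pr.1.length + 1 + 1 from by omega]
      simp only [List.take_succ_cons, List.cons.injEq, true_and]
      rw [List.take_append, List.take_of_length_le (by omega), Nat.add_sub_cancel_left]
    have hrec : pvALoop cs (i + 1 + pr.1.length + 1) = pvAList pr.2.tail := by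
      rw [pvALoop_eq_aList cs (i + 1 + pr.1.length + 1)]
      congr 1
      have h2 := congrArg List.tail hdropj
      simpa [List.tail_drop] using h2
    rw [hslice, hrec, hd, pvAList]
  · rename_i h
    rw [List.drop_eq_nil_of_le (by omega), pvAList]
termination_by cs.length - i
decreasing_by
  omega

-- B: processing t with a segment open on start char c and buffer buf
theorem pvB_open (t : List Char) (c : Char) (res : List String) (buf : List Char) :
    t.foldl pvBStep (res, some c, buf) =
      (match (pvBrk c t).2 with
       | [] => (res, some c, buf ++ (pvBrk c t).1)
       | x :: r' => r'.foldl pvBStep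
           (res ++ [String.ofList (buf ++ (pvBrk c t).1 ++ [x])], none,
            buf ++ (pvBrk c t).1 ++ [x])) := by
  induction t generalizing buf with
  | nil => simp [pvBrk]
  | cons x t ih =>
    by_cases h : x = c
    · subst h
      simp [pvBrk, List.foldl_cons, pvBStep]
    · rw [List.foldl_cons]
      show t.foldl pvBStep (pvBStep (res, some c, buf) x) = _
      simp only [pvBStep, if_neg h]
      rw [ih (buf ++ [x])]
      simp [pvBrk, h]

-- flush of the fold state (the 'if start is not None' epilogue of B)
def pvFlush (st : List String × Option Char × List Char) : List String :=
  match st with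
  | (res, none, _) => res
  | (res, some _, buf) => res ++ [String.ofList buf]

theorem pvB_main (n : Nat) (l : List Char) (hn : l.length ≤ n)
    (res : List String) (buf0 : List Char) :
    pvFlush (l.foldl pvBStep (res, none, buf0)) = res ++ pvAList l := by
  induction n generalizing l res buf0 with
  | zero =>
    have : l = [] := List.eq_nil_of_length_eq_zero (by omega)
    subst this
    simp [pvAList, pvFlush]
  | succ n ih =>
    match l with
    | [] => simp [pvAList, pvFlush]
    | c :: t =>
      rw [List.foldl_cons]
      show pvFlush (t.foldl pvBStep (res, some c, [c])) = _
      rw [pvB_open]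
      cases hr : (pvBrk c t).2 with
      | nil =>
        simp only [pvFlush]
        rw [pvAList]
        simp only [hr, List.take_nil, List.tail_nil, List.append_nil]
        rw [pvAList]
        simp
      | cons x r' =>
        have hlen : r'.length ≤ n := by
          have h1 := pvBrk_len c t
          rw [hr] at h1
          simp only [List.length_cons] at h1 hn
          omega
        rw [ih r' hlen]
        simp [pvAList, hr]

-- ===== VERDICT (by name: the statement is the Claim_ definition above) =====
theorem split_by_same_char_spec : Claim_equal_split_by_same_char := by
  intro s _
  unfold Spec_split_by_same_char split_by_same_char split_by_same_char_alt
  rw [pvALoop_eq_aList]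
  simp only [List.drop_zero]
  have hmain := pvB_main s.toList.length s.toList le_rfl [] []
  cases hst : s.toList.foldl pvBStep ([], none, []) with
  | mk res rest =>
    cases rest with
    | mk o buf =>
      rw [hst] at hmain
      cases o <;> simp [pvFlush] at hmain <;> simp [hmain]
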